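-- pv_equiv track=rewrite | github.com/Dashuto22/DSA | Arrays_and_Hashing/Naming_a_company.py | name_a_company
-- ===== SOURCE A (Python) =====
-- import collections
--
-- def name_a_company(ideas):
--     wordmap = collections.defaultdict(set)
--
--     for i in ideas:
--         wordmap[i[0]].add(i[1:])
--
--     res = 0
--     for ch1 in wordmap:
--         for ch2 in wordmap:
--             if ch1 == ch2:
--                 continue
--
--             intersect = 0
--             for w in wordmap[ch1]:
--                 if w in wordmap[ch2]:
--                     intersect += 1
--
--             distinct1 = len(wordmap[ch1]) - intersect
--             distinct2 = len(wordmap[ch2]) - intersect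
--
--             res += distinct2 * distinct1
--
--     return res
-- ===== SOURCE B (Python) =====
-- def name_a_company(ideas):
--     # Inverted index: suffix -> set of first letters owning it, plus the
--     # first letters in order of first appearance.
--     inv = {}
--     letters = []
--     for i in ideas:
--         c = i[0]
--         s = i[1:]
--         if c not in letters:
--             letters.append(c)
--         inv.setdefault(s, set()).add(c)
--     groups = list(inv.values())
--     res = 0
--     for c1 in letters:
--         for c2 in letters:
--             if c1 != c2:
--                 n1 = 0
--                 m = 0
--                 n2 = 0
--                 for g in groups:
--                     if c1 in g:
--                         n1 += 1
--                     if c1 in g and c2 in g: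
--                         m += 1
--                     if c2 in g:
--                         n2 += 1
--                 res += (n1 - m) * (n2 - m)
--     return res
-- ===== Notes on version B (the rewrite author's own statement) =====
-- stated objective: alternative
-- what changed: Instead of A's per-letter suffix sets with a membership scan per ordered letter pair, B builds an inverted index (suffix -> set of first letters) and computes each pair's group sizes and intersection size by counting over the inverted-index groups.
import Mathlib
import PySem

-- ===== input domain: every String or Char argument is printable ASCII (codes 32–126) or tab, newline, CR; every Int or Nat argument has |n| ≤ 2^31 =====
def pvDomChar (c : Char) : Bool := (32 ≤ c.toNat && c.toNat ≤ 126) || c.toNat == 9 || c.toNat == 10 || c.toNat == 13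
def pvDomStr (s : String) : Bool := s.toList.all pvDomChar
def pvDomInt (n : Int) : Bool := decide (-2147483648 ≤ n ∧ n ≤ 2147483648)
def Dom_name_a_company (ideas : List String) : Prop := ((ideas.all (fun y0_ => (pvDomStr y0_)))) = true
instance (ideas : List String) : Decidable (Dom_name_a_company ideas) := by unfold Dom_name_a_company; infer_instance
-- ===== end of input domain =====

-- B replaces A's per-letter suffix sets by an inverted index (suffix -> set of first
-- letters) and counts group sizes / intersections from it: an alternative decomposition.

-- ===== PORT A =====
def name_a_company (ideas : List String) : Int :=
  let wordmap : PySem.Dict Char (PySem.Set String) :=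
    ideas.foldl (fun d i =>
      d.modify ((PySem.Str.pyGet? i 0).getD ' ') PySem.Set.empty
        (fun g => PySem.Set.add g (PySem.Str.slice i (some 1) none))) PySem.Dict.empty
  wordmap.keys.foldl (fun res ch1 =>
    wordmap.keys.foldl (fun res ch2 =>
      if ch1 == ch2 then res
      else
        let g1 := wordmap.getD ch1 PySem.Set.empty
        let g2 := wordmap.getD ch2 PySem.Set.empty
        let intersect : Int := g1.foldl (fun n w => if PySem.Set.contains g2 w then n + 1 else n) 0
        res + (PySem.Set.len g2 - intersect) * (PySem.Set.len g1 - intersect)) res) 0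

-- ===== PORT B =====
-- 'inv.setdefault(s, set()).add(c)' mutates the set stored at s: exactly Dict.modify s ∅ (·.add c).
def name_a_company_alt (ideas : List String) : Int :=
  let st := ideas.foldl
    (fun (st : PySem.Dict String (PySem.Set Char) × List Char) i =>
      (st.1.modify (PySem.Str.slice i (some 1) none) PySem.Set.empty
         (fun g => PySem.Set.add g ((PySem.Str.pyGet? i 0).getD ' ')),
       if ((PySem.Str.pyGet? i 0).getD ' ') ∈ st.2 then st.2
       else st.2 ++ [(PySem.Str.pyGet? i 0).getD ' ']))
    (PySem.Dict.empty, [])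
  let groups := st.1.values
  st.2.foldl (fun res c1 =>
    st.2.foldl (fun res c2 =>
      if c1 ≠ c2 then
        let t := groups.foldl (fun (t : Int × Int × Int) g =>
          (if PySem.Set.contains g c1 then t.1 + 1 else t.1,
           if PySem.Set.contains g c1 && PySem.Set.contains g c2 then t.2.1 + 1 else t.2.1,
           if PySem.Set.contains g c2 then t.2.2 + 1 else t.2.2)) (0, 0, 0)
        res + (t.1 - t.2.1) * (t.2.2 - t.2.1)
      else res) res) 0

-- ===== PRECONDITION & SPEC =====
-- Pre_ excludes only lists containing the empty string, on which A raises IndexError at i[0].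
def Pre_name_a_company (ideas : List String) : Prop := "" ∉ ideas
instance (ideas : List String) : Decidable (Pre_name_a_company ideas) := by unfold Pre_name_a_company; infer_instance
def pvWitness_name_a_company : List String := ["coffee", "donuts", "time", "toffee"]

def Spec_name_a_company (ideas : List String) (out : Int) : Prop := out = name_a_company_alt ideas
instance (ideas : List String) (out : Int) : Decidable (Spec_name_a_company ideas out) := by unfold Spec_name_a_company; infer_instance

-- ===== CLAIM (what is proved, stated in full; the proofs are below) =====
def Claim_equal_name_a_company : Prop := ∀ (ideas : List String), Dom_name_a_company ideas → Pre_name_a_company ideas → Spec_name_a_company ideas (name_a_company ideas)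

-- ===== LEMMAS AND PROOFS =====

-- first letter / suffix of an idea, and the derived (letter, suffix) pair list
def pvFirst (i : String) : Char := (PySem.Str.pyGet? i 0).getD ' '
def pvRest (i : String) : String := PySem.Str.slice i (some 1) none
def pvPairs (ideas : List String) : List (Char × String) :=
  ideas.map (fun i => (pvFirst i, pvRest i))
-- suffix group of a letter, letter group of a suffix, the distinct letters / suffixes
def pvS (ideas : List String) (c : Char) : PySem.Set String :=
  PySem.Set.ofList (((pvPairs ideas).filter (fun p => p.1 == c)).map (·.2))
def pvT (ideas : List String) (s : String) : PySem.Set Char :=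
  PySem.Set.ofList (((pvPairs ideas).filter (fun p => p.2 == s)).map (·.1))
def pvK (ideas : List String) : List Char :=
  PySem.Set.ofList ((pvPairs ideas).map (·.1))
def pvQ (ideas : List String) : List String :=
  PySem.Set.ofList ((pvPairs ideas).map (·.2))

-- closed form of the grouping fold: the group of c is the set of values seen at key c
lemma getD_build {κ ν : Type} [BEq κ] [LawfulBEq κ] [DecidableEq κ] [BEq ν]
    (l : List (κ × ν)) (d : PySem.Dict κ (PySem.Set ν)) (c : κ) :
    (l.foldl (fun d p => d.modify p.1 PySem.Set.empty (fun g => PySem.Set.add g p.2)) d).getD c PySem.Set.empty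
      = PySem.Set.update (d.getD c PySem.Set.empty) ((l.filter (fun p => p.1 == c)).map (·.2)) := by
  induction l generalizing d with
  | nil => rfl
  | cons p t ih =>
    simp only [List.foldl_cons, ih, List.filter_cons]
    by_cases h : p.1 = c
    · simp [h, PySem.Set.update]
    · simp [PySem.Dict.getD_modify, h, Ne.symm h]

lemma mem_T_iff_mem_S (ideas : List String) (c : Char) (s : String) :
    (c ∈ pvT ideas s) ↔ s ∈ pvS ideas c := by
  simp only [pvT, pvS, PySem.Set.mem_ofList, List.mem_map, List.mem_filter]
  constructor
  · rintro ⟨p, ⟨hp, h2⟩, h1⟩; exact ⟨p, ⟨hp, by simpa using h1⟩, by simpa using h2⟩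
  · rintro ⟨p, ⟨hp, h1⟩, h2⟩; exact ⟨p, ⟨hp, by simpa using h2⟩, by simpa using h1⟩

lemma mem_Q_of_mem_S (ideas : List String) (c : Char) (s : String)
    (h : s ∈ pvS ideas c) : s ∈ pvQ ideas := by
  simp only [pvS, pvQ, PySem.Set.mem_ofList, List.mem_map, List.mem_filter] at h ⊢
  obtain ⟨p, ⟨hp, _⟩, h2⟩ := h
  exact ⟨p, hp, h2⟩

-- counting members of a nodup sublist inside a nodup list is its length
lemma countP_mem_eq_length {α : Type} [DecidableEq α] {l t : List α}
    (hl : l.Nodup) (ht : t.Nodup) (hsub : ∀ x ∈ t, x ∈ l) :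
    l.countP (fun x => decide (x ∈ t)) = t.length := by
  rw [List.countP_eq_length_filter]
  refine ((List.perm_ext_iff_of_nodup (hl.filter _) ht).2 ?_).length_eq
  intro a
  simp only [List.mem_filter, decide_eq_true_eq]
  exact ⟨fun h => h.2, fun h => ⟨hsub a h, h⟩⟩

lemma count_N (ideas : List String) (c : Char) :
    (pvQ ideas).countP (fun s => decide (s ∈ pvS ideas c)) = (pvS ideas c).length :=
  countP_mem_eq_length (PySem.Set.nodup_ofList _) (PySem.Set.nodup_ofList _)
    (mem_Q_of_mem_S ideas c)

lemma count_M (ideas : List String) (c1 c2 : Char) :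
    (pvQ ideas).countP (fun s => decide (s ∈ pvS ideas c1) && decide (s ∈ pvS ideas c2))
      = (pvS ideas c1).countP (fun w => decide (w ∈ pvS ideas c2)) := by
  rw [List.countP_eq_length_filter, List.countP_eq_length_filter]
  refine ((List.perm_ext_iff_of_nodup ((PySem.Set.nodup_ofList _).filter _)
    ((PySem.Set.nodup_ofList _).filter _)).2 ?_).length_eq
  intro a
  simp only [List.mem_filter, decide_eq_true_eq, Bool.and_eq_true]
  constructor
  · rintro ⟨_, h1, h2⟩; exact ⟨h1, h2⟩
  · rintro ⟨h1, h2⟩; exact ⟨mem_Q_of_mem_S ideas c1 a h1, h1, h2⟩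

lemma contains_eq_decide_mem {α : Type} [DecidableEq α] (s : PySem.Set α) (x : α) :
    PySem.Set.contains s x = decide (x ∈ s) := by simp [PySem.Set.contains]

lemma decide_mem_T (ideas : List String) (c : Char) (s : String) :
    decide (c ∈ pvT ideas s) = decide (s ∈ pvS ideas c) :=
  decide_eq_decide.mpr (mem_T_iff_mem_S ideas c s)

-- the A-side grouping dict: keys and groups
lemma keysA (ideas : List String) :
    (ideas.foldl (fun d i =>
      d.modify ((PySem.Str.pyGet? i 0).getD ' ') PySem.Set.empty
        (fun g => PySem.Set.add g (PySem.Str.slice i (some 1) none))) PySem.Dict.empty).keys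
      = pvK ideas := by
  rw [PySem.Dict.keys_foldl_modify_key ideas (fun i => (PySem.Str.pyGet? i 0).getD ' ')
      PySem.Set.empty (fun _ i g => PySem.Set.add g (PySem.Str.slice i (some 1) none)) PySem.Dict.empty]
  simp [pvK, pvPairs, PySem.Set.update, PySem.Set.ofList_eq_foldl, List.foldl_map,
    List.map_map, pvFirst, Function.comp_def]

lemma getDA (ideas : List String) (c : Char) :
    (ideas.foldl (fun d i =>
      d.modify ((PySem.Str.pyGet? i 0).getD ' ') PySem.Set.empty
        (fun g => PySem.Set.add g (PySem.Str.slice i (some 1) none))) PySem.Dict.empty).getD c PySem.Set.empty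
      = pvS ideas c := by
  have h := getD_build (pvPairs ideas) PySem.Dict.empty c
  rw [pvPairs, List.foldl_map] at h
  simpa [pvS, pvPairs, PySem.Set.update, PySem.Set.ofList_eq_foldl, pvFirst, pvRest] using h

-- the B-side state fold splits into the inverted index and the letter list
lemma splitB (ideas : List String) (d : PySem.Dict String (PySem.Set Char)) (L : List Char) :
    ideas.foldl
      (fun (st : PySem.Dict String (PySem.Set Char) × List Char) i =>
        (st.1.modify (PySem.Str.slice i (some 1) none) PySem.Set.empty
           (fun g => PySem.Set.add g ((PySem.Str.pyGet? i 0).getD ' ')),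
         if ((PySem.Str.pyGet? i 0).getD ' ') ∈ st.2 then st.2
         else st.2 ++ [(PySem.Str.pyGet? i 0).getD ' '])) (d, L)
    = (ideas.foldl (fun d i =>
         d.modify (PySem.Str.slice i (some 1) none) PySem.Set.empty
           (fun g => PySem.Set.add g ((PySem.Str.pyGet? i 0).getD ' '))) d,
       ideas.foldl (fun L i =>
         if ((PySem.Str.pyGet? i 0).getD ' ') ∈ L then L
         else L ++ [(PySem.Str.pyGet? i 0).getD ' ']) L) := by
  induction ideas generalizing d L with
  | nil => rfl
  | cons i t ih => simp only [List.foldl_cons]; exact ih _ _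

lemma lettersB (ideas : List String) :
    ideas.foldl (fun L i =>
      if ((PySem.Str.pyGet? i 0).getD ' ') ∈ L then L
      else L ++ [(PySem.Str.pyGet? i 0).getD ' ']) []
    = pvK ideas := by
  have hfun : (fun (L : List Char) i =>
      if ((PySem.Str.pyGet? i 0).getD ' ') ∈ L then L
      else L ++ [(PySem.Str.pyGet? i 0).getD ' '])
      = fun L i => PySem.Set.add L (pvFirst i) := by
    funext L i
    simp [PySem.Set.add, pvFirst, PySem.Set.contains]
  rw [hfun]
  simp [pvK, pvPairs, PySem.Set.ofList_eq_foldl, List.foldl_map, List.map_map, Function.comp_def]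

lemma getDB (ideas : List String) (s : String) :
    (ideas.foldl (fun d i =>
       d.modify (PySem.Str.slice i (some 1) none) PySem.Set.empty
         (fun g => PySem.Set.add g ((PySem.Str.pyGet? i 0).getD ' '))) PySem.Dict.empty).getD s PySem.Set.empty
      = pvT ideas s := by
  have h := getD_build (ideas.map (fun i => (pvRest i, pvFirst i))) PySem.Dict.empty s
  rw [List.foldl_map] at h
  simp only [List.filter_map, List.map_map] at h
  simpa [pvT, pvPairs, PySem.Set.update, PySem.Set.ofList_eq_foldl, pvFirst, pvRest,
    List.filter_map, List.map_map, Function.comp_def] using h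

lemma valuesB (ideas : List String) :
    (ideas.foldl (fun d i =>
       d.modify (PySem.Str.slice i (some 1) none) PySem.Set.empty
         (fun g => PySem.Set.add g ((PySem.Str.pyGet? i 0).getD ' '))) PySem.Dict.empty).values
      = (pvQ ideas).map (fun s => pvT ideas s) := by
  have hnd : (ideas.foldl (fun d i =>
       d.modify (PySem.Str.slice i (some 1) none) PySem.Set.empty
         (fun g => PySem.Set.add g ((PySem.Str.pyGet? i 0).getD ' '))) PySem.Dict.empty).keys.Nodup := by
    exact PySem.Dict.nodup_keys_foldl_modify_key ideas
      (fun i => PySem.Str.slice i (some 1) none) PySem.Set.empty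
      (fun _ i g => PySem.Set.add g ((PySem.Str.pyGet? i 0).getD ' ')) PySem.Dict.empty
      (by simp [PySem.Dict.keys_empty])
  rw [PySem.Dict.values_eq_map_keys _ hnd PySem.Set.empty]
  have hk : (ideas.foldl (fun d i =>
       d.modify (PySem.Str.slice i (some 1) none) PySem.Set.empty
         (fun g => PySem.Set.add g ((PySem.Str.pyGet? i 0).getD ' '))) PySem.Dict.empty).keys
      = pvQ ideas := by
    rw [PySem.Dict.keys_foldl_modify_key ideas (fun i => PySem.Str.slice i (some 1) none)
        PySem.Set.empty (fun _ i g => PySem.Set.add g ((PySem.Str.pyGet? i 0).getD ' ')) PySem.Dict.empty]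
    simp [pvQ, pvPairs, PySem.Set.update, PySem.Set.ofList_eq_foldl, List.foldl_map,
      List.map_map, pvRest, Function.comp_def]
  rw [hk]
  exact List.map_congr_left (fun s _ => getDB ideas s)

-- ===== VERDICT (by name: the statement is the Claim_ definition above) =====
theorem name_a_company_spec : Claim_equal_name_a_company := by
  intro ideas _ _
  show name_a_company ideas = name_a_company_alt ideas
  simp only [name_a_company, name_a_company_alt]
  rw [splitB]
  simp only [keysA, lettersB, valuesB, getDA]
  apply PySem.List.foldl_congr_mem
  intro res c1 _
  apply PySem.List.foldl_congr_mem
  intro res2 c2 _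
  by_cases h : c1 = c2
  · simp [h]
  · rw [if_neg (by simpa using h), if_pos h]
    rw [PySem.List.foldl_prod_mk
      (f := fun (n : Int) g => if PySem.Set.contains g c1 then n + 1 else n)
      (g := fun (s : Int × Int) g =>
        (if PySem.Set.contains g c1 && PySem.Set.contains g c2 then s.1 + 1 else s.1,
         if PySem.Set.contains g c2 then s.2 + 1 else s.2))]
    rw [PySem.List.foldl_prod_mk
      (f := fun (n : Int) g => if PySem.Set.contains g c1 && PySem.Set.contains g c2 then n + 1 else n)
      (g := fun (n : Int) g => if PySem.Set.contains g c2 then n + 1 else n)]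
    dsimp only
    simp only [PySem.List.foldl_if_add_one, List.countP_map, Function.comp_def,
      contains_eq_decide_mem, decide_mem_T]
    rw [count_N ideas c1, count_N ideas c2, count_M ideas c1 c2]
    simp only [PySem.Set.len]
    ring
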